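-- pv_equiv track=rewrite | github.com/chorokdong/CodingTest | Programmers_Python/[Lv.1]프로그래머스_햄버거_만들기.py | solution
-- ===== SOURCE A (Python) =====
-- def solution(ingredient):
--     i = 0
--     result = 0
--     while i <= len(ingredient):
--         if ingredient[i : i + 4] == [1,2,3,1]:
--             del(ingredient[i : i + 4])
--             i -= 3
--             result += 1
--         i += 1
--
--     return result
-- ===== SOURCE B (Python) =====
-- def solution(ingredient):
--     stack = []
--     count = 0
--     for x in ingredient:
--         stack.append(x)
--         if stack[-4:] == [1, 2, 3, 1]:
--             del stack[-4:]
--             count += 1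
--     return count
-- ===== Notes on version B (the rewrite author's own statement) =====
-- stated objective: faster
-- what changed: Replaces the rescan-and-delete-from-the-middle loop (each 4-element del shifts the whole tail and the index backtracks) by a single left-to-right pass with a stack that pops four elements whenever its top forms the burger pattern.
import Mathlib
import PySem

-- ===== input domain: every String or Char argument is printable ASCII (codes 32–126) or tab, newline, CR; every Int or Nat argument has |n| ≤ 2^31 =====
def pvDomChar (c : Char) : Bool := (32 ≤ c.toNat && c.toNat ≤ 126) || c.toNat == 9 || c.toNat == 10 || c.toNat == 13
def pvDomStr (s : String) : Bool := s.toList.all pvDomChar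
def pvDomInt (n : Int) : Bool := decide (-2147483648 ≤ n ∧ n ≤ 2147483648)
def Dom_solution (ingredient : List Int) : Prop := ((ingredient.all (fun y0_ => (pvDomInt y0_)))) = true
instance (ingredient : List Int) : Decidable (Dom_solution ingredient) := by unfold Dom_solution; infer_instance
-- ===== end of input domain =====

-- B replaces A's rescan-and-delete-from-the-middle loop by a one-pass stack (pop 4 when the top
-- four elements form the burger pattern); equivalence is about the RETURN value only: Python A
-- mutates its argument (the del statement), B does not.

-- ===== PORT A =====
-- del ingredient[i:i+4]  ported as  ingredient[:i] ++ ingredient[i+4:]; exact whenever the deleted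
-- slice is taken with stop = start + 4 ≥ start, as here.
def delSlice (L : List Int) (i : Int) : List Int :=
  PySem.List.slice L none (some i) ++ PySem.List.slice L (some (i + 4)) none

-- cited by aloop's decreasing_by: a successful 4-element match shortens the list by 4
theorem delSlice_length_of_match (L : List Int) (i : Int)
    (h : PySem.List.slice L (some i) (some (i + 4)) = [1, 2, 3, 1]) :
    (delSlice L i).length + 4 = L.length := by
  have hlen : (PySem.List.slice L (some i) (some (i + 4))).length = 4 := by rw [h]; rfl
  rw [PySem.List.length_slice] at hlen
  have h0 : PySem.List.slice L none (some i) = PySem.List.slice L (some 0) (some i) := by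
    rw [PySem.List.slice_zero_start]
  have hl0 : (PySem.List.slice L (some 0) (some i)).length
      = PySem.List.clampIdx L.length i - PySem.List.clampIdx L.length 0 := by
    rw [PySem.List.length_slice]
  have hz : PySem.List.clampIdx L.length (0 : Int) = 0 := by
    simp
  have h1 : PySem.List.slice L (some (i + 4)) none = L.drop (PySem.List.clampIdx L.length (i + 4)) := by
    rw [PySem.List.slice_some_none]
  have hle1 := PySem.List.clampIdx_le L.length i
  have hle2 := PySem.List.clampIdx_le L.length (i + 4)
  simp only [delSlice, List.length_append, h0, hl0, hz, h1, List.length_drop]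
  omega

def aloop (L : List Int) (i : Int) (r : Int) : Int :=
  if _h : i ≤ (L.length : Int) then
    if hm : PySem.List.slice L (some i) (some (i + 4)) = [1, 2, 3, 1] then
      aloop (delSlice L i) (i - 3 + 1) (r + 1)
    else
      aloop L (i + 1) r
  else r
termination_by ((3 * (L.length : Int) + 7) - i).toNat
decreasing_by
  · have := delSlice_length_of_match L i hm; omega
  · omega

def solution (ingredient : List Int) : Int := aloop ingredient 0 0

-- ===== PORT B =====
-- the Python stack is kept here in reversed order: append x ↦ x :: stack,
-- stack[-4:] == [1,2,3,1] ↦ stack.take 4 = [1,3,2,1], del stack[-4:] ↦ stack.drop 4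
def bstep (s : List Int × Int) (x : Int) : List Int × Int :=
  let st := x :: s.1
  if st.take 4 = [1, 3, 2, 1] then (st.drop 4, s.2 + 1) else (st, s.2)

def solution_alt (ingredient : List Int) : Int := (ingredient.foldl bstep ([], 0)).2

-- ===== PRECONDITION & SPEC =====
def Spec_solution (ingredient : List Int) (out : Int) : Prop := out = solution_alt ingredient
instance (ingredient : List Int) (out : Int) : Decidable (Spec_solution ingredient out) := by unfold Spec_solution; infer_instance

-- ===== CLAIM (what is proved, stated in full; the proofs are below) =====
def Claim_equal_solution : Prop := ∀ (ingredient : List Int), Dom_solution ingredient → Spec_solution ingredient (solution ingredient)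

-- ===== LEMMAS AND PROOFS =====

-- B's fold, written as a recursion over the rest of the input (s = reversed stack)
def bgo : List Int → List Int → Int → Int
  | _, [], c => c
  | s, x :: t, c =>
    if (x :: s).take 4 = [1, 3, 2, 1] then bgo ((x :: s).drop 4) t (c + 1)
    else bgo (x :: s) t c

theorem foldl_eq_bgo : ∀ (t s : List Int) (c : Int), (t.foldl bstep (s, c)).2 = bgo s t c := by
  intro t
  induction t with
  | nil => intro s c; rfl
  | cons x t ih =>
    intro s c
    rw [List.foldl_cons]
    by_cases h : (x :: s).take 4 = [1, 3, 2, 1]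
    · have hb : bstep (s, c) x = ((x :: s).drop 4, c + 1) := by
        simp only [bstep]; rw [if_pos h]
      rw [hb, ih]
      simp only [bgo]; rw [if_pos h]
    · have hb : bstep (s, c) x = (x :: s, c) := by
        simp only [bstep]; rw [if_neg h]
      rw [hb, ih]
      simp only [bgo]; rw [if_neg h]

-- clampIdx L.length i for a nonnegative index, as a min
theorem clamp_nonneg (L : List Int) (i : Int) (h : 0 ≤ i) :
    PySem.List.clampIdx L.length i = min i.toNat L.length := by
  rw [show i = ((i.toNat : Nat) : Int) by omega]
  exact PySem.List.clampIdx_natCast _ _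

-- clampIdx L.length i for a negative index
theorem clamp_neg (L : List Int) (i : Int) (h : i < 0) :
    PySem.List.clampIdx L.length i = L.length - (-i).toNat := by
  obtain ⟨k, hk, rfl⟩ : ∃ k : Nat, 0 < k ∧ i = -(k : Int) := ⟨(-i).toNat, by omega, by omega⟩
  simpa using PySem.List.clampIdx_neg_natCast L.length k hk

-- the 4-window slice cannot match once fewer than 4 elements remain to the right of i
theorem noMatchEnd (L : List Int) (i : Int) (h : (L.length : Int) ≤ i + 3) :
    PySem.List.slice L (some i) (some (i + 4)) ≠ [1, 2, 3, 1] := by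
  intro hm
  have h4 : (PySem.List.slice L (some i) (some (i + 4))).length = 4 := by rw [hm]; rfl
  rw [PySem.List.length_slice] at h4
  have hle1 := PySem.List.clampIdx_le L.length i
  have hle2 := PySem.List.clampIdx_le L.length (i + 4)
  by_cases hi : 0 ≤ i
  · rw [clamp_nonneg L i hi, clamp_nonneg L (i + 4) (by omega)] at h4
    omega
  · omega

-- the 4-window slice cannot match at the indices -3, -2, -1
theorem noMatchNeg (L : List Int) (i : Int) (h1 : -3 ≤ i) (h2 : i < 0) :
    PySem.List.slice L (some i) (some (i + 4)) ≠ [1, 2, 3, 1] := by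
  intro hm
  have h4 : (PySem.List.slice L (some i) (some (i + 4))).length = 4 := by rw [hm]; rfl
  rw [PySem.List.length_slice, clamp_neg L i h2, clamp_nonneg L (i + 4) (by omega)] at h4
  omega

-- once fewer than 4 elements remain to the right of i, the loop only counts i up and stops
theorem aend_fuel : ∀ (k : Nat) (L : List Int) (i r : Int),
    (((L.length : Int) + 1) - i).toNat ≤ k → (L.length : Int) ≤ i + 3 → aloop L i r = r := by
  intro k
  induction k with
  | zero =>
    intro L i r hk h
    rw [aloop, dif_neg (by omega)]
  | succ k ih =>
    intro L i r hk h
    by_cases hle : i ≤ (L.length : Int)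
    · rw [aloop, dif_pos hle, dif_neg (noMatchEnd L i h)]
      exact ih L (i + 1) r (by omega) (by omega)
    · rw [aloop, dif_neg hle]

theorem aend (L : List Int) (i r : Int) (h : (L.length : Int) ≤ i + 3) (h2 : -3 ≤ i) :
    aloop L i r = r :=
  aend_fuel (L.length + 4) L i r (by omega) h

-- the slice and the deletion at a concrete split point
theorem sliceAt (s₀ rest : List Int) :
    PySem.List.slice (s₀ ++ rest) (some (s₀.length : Int)) (some ((s₀.length : Int) + 4)) = rest.take 4 := by
  rw [show ((s₀.length : Int) + 4) = ((s₀.length : Int) + ((4 : Nat) : Int)) by norm_num]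
  rw [PySem.List.slice_natCast_add, List.drop_left]

theorem delAt (s₀ rest : List Int) :
    delSlice (s₀ ++ rest) (s₀.length : Int) = s₀ ++ rest.drop 4 := by
  unfold delSlice
  rw [PySem.List.slice_to_natCast, List.take_left]
  rw [show ((s₀.length : Int) + 4) = (((s₀.length + 4 : Nat)) : Int) by push_cast; ring]
  rw [PySem.List.slice_from_natCast]
  congr 1
  rw [List.drop_append]
  simp

-- an occurrence of the pattern in l ++ [x] lies inside l or ends at x
theorem pat_infix_snoc (l : List Int) (x : Int) (h : [1, 2, 3, 1] <:+: l ++ [x]) :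
    [1, 2, 3, 1] <:+: l ∨ [1, 2, 3, 1] <:+ (l ++ [x]) := by
  obtain ⟨u, v, huv⟩ := h
  rcases List.eq_nil_or_concat v with rfl | ⟨v', y, rfl⟩
  · right; exact ⟨u, by simpa using huv⟩
  · left
    have huv' : (u ++ [1, 2, 3, 1] ++ v') ++ [y] = l ++ [x] := by
      simpa [List.concat_eq_append, List.append_assoc] using huv
    obtain ⟨h1, -⟩ := List.append_inj' huv' rfl
    exact ⟨u, v', h1⟩

-- a suffix occurrence ending at the stack top, read on the stack
theorem suffix_take (s : List Int) (x : Int) (h : [1, 2, 3, 1] <:+ (x :: s).reverse) :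
    (x :: s).take 4 = [1, 3, 2, 1] := by
  have h2 : ([1, 2, 3, 1] : List Int).reverse <+: (x :: s).reverse.reverse :=
    List.reverse_prefix.mpr h
  rw [List.reverse_reverse] at h2
  have := List.prefix_iff_eq_take.mp h2
  simpa using this.symm

-- pushing an element that does not complete the pattern keeps the stack pattern-free
theorem stack_inv (s : List Int) (x : Int) (hs : ¬ [1, 2, 3, 1] <:+: s.reverse)
    (hx : (x :: s).take 4 ≠ [1, 3, 2, 1]) : ¬ [1, 2, 3, 1] <:+: (x :: s).reverse := by
  intro h
  rw [List.reverse_cons] at h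
  rcases pat_infix_snoc _ _ h with h1 | h2
  · exact hs h1
  · exact hx (suffix_take s x (by rwa [List.reverse_cons]))

-- a stack of at most 2 elements plus a push cannot show the 4-element pattern
theorem short_take (s : List Int) (x : Int) (h : s.length ≤ 2) :
    (x :: s).take 4 ≠ [1, 3, 2, 1] := by
  intro hc
  have := congrArg List.length hc
  simp at this
  omega

-- the bisimulation: A at index |s| - 3 on reverse s ++ t behaves as B with stack s and rest t
theorem main_lemma : ∀ (n : Nat) (s t : List Int) (r : Int),
    2 * s.length + 3 * t.length ≤ n → ¬ [1, 2, 3, 1] <:+: s.reverse →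
    aloop (s.reverse ++ t) ((s.length : Int) - 3) r = bgo s t r := by
  intro n
  induction n with
  | zero =>
    intro s t r hn hinv
    cases s with
    | cons a s1 => simp at hn
    | nil =>
      cases t with
      | cons x t1 => simp at hn
      | nil =>
        simp only [List.reverse_nil, List.nil_append, List.length_nil, Nat.cast_zero, bgo]
        exact aend [] (0 - 3) r (by simp) (by norm_num)
  | succ n ih =>
    intro n0s t r hn hinv
    cases t with
    | nil =>
      simp only [List.append_nil, bgo]
      exact aend n0s.reverse ((n0s.length : Int) - 3) r (by simp) (by omega)
    | cons x t' =>
      by_cases hlen : n0s.length ≤ 2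
      · -- stack still shorter than 3: the window is at a negative index and cannot match
        have hcond : (n0s.length : Int) - 3 ≤ ((n0s.reverse ++ x :: t').length : Int) := by
          simp; omega
        rw [aloop, dif_pos hcond,
          dif_neg (noMatchNeg _ ((n0s.length : Int) - 3) (by omega) (by omega))]
        have hB : (x :: n0s).take 4 ≠ [1, 3, 2, 1] := short_take n0s x hlen
        have hrw : n0s.reverse ++ x :: t' = (x :: n0s).reverse ++ t' := by simp
        have hidx : (n0s.length : Int) - 3 + 1 = (((x :: n0s).length : Int) - 3) := by
          simp; omega
        rw [hrw, hidx]
        rw [ih (x :: n0s) t' r (by simp at hn ⊢; omega) (stack_inv n0s x hinv hB)]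
        simp only [bgo]
        rw [if_neg hB]
      · -- stack a :: b :: c :: s₀, window [c, b, a, x] at index |s₀|
        obtain ⟨a, b, c, s₀, rfl⟩ : ∃ a b c s₀, n0s = a :: b :: c :: s₀ := by
          match n0s, hlen with
          | a :: b :: c :: s₀, _ => exact ⟨a, b, c, s₀, rfl⟩
          | [], h | [_], h | [_, _], h => simp at h
        have hrw : (a :: b :: c :: s₀).reverse ++ x :: t'
            = s₀.reverse ++ (c :: b :: a :: x :: t') := by simp
        have hidx : (((a :: b :: c :: s₀).length : Int)) - 3 = ((s₀.reverse.length : Int)) := by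
          simp; omega
        rw [hrw, hidx]
        have hslice := sliceAt s₀.reverse (c :: b :: a :: x :: t')
        have htake : (c :: b :: a :: x :: t').take 4 = [c, b, a, x] := rfl
        rw [htake] at hslice
        have hcond : ((s₀.reverse.length : Int)) ≤ (((s₀.reverse ++ c :: b :: a :: x :: t').length : Int)) := by
          simp; omega
        rw [aloop, dif_pos hcond]
        by_cases hm : ([c, b, a, x] : List Int) = [1, 2, 3, 1]
        · rw [dif_pos (by rw [hslice]; exact hm)]
          have hm' := hm
          simp only [List.cons.injEq, and_true] at hm'
          obtain ⟨rfl, rfl, rfl, rfl⟩ := hm'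
          have hdel := delAt s₀.reverse (1 :: 2 :: 3 :: 1 :: t')
          have hdrop : (1 :: 2 :: 3 :: 1 :: t' : List Int).drop 4 = t' := rfl
          rw [hdrop] at hdel
          rw [hdel]
          -- B makes the matching step
          have hBs : bgo (3 :: 2 :: 1 :: s₀) (1 :: t') r = bgo s₀ t' (r + 1) := by
            simp [bgo]
          rw [hBs]
          have hidx2 : ((s₀.reverse.length : Int)) - 3 + 1 = ((s₀.length : Int)) - 2 := by
            simp; omega
          rw [hidx2]
          -- the stack below the popped pattern is still pattern-free
          have hs₀ : ¬ [1, 2, 3, 1] <:+: s₀.reverse := by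
            intro hocc
            exact hinv (hocc.trans ⟨[], [1, 2, 3], by simp⟩)
          cases t' with
          | nil =>
            simp only [List.append_nil, bgo]
            exact aend s₀.reverse ((s₀.length : Int) - 2) (r + 1) (by simp; omega) (by omega)
          | cons x' t'' =>
            -- B's next push cannot match: that would put the pattern inside the old stack
            have hchk : (x' :: s₀).take 4 ≠ [1, 3, 2, 1] := by
              intro hc
              match s₀, hc, hinv with
              | [], hc, _ => simp at hc
              | [_], hc, _ => simp at hc
              | [_, _], hc, _ => simp at hc
              | s0a :: s0b :: s0c :: s₁, hc, hinv =>
                simp only [List.take_succ_cons, List.take_zero, List.cons.injEq, and_true] at hc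
                obtain ⟨rfl, rfl, rfl, rfl⟩ := hc
                exact hinv ⟨s₁.reverse, [2, 3], by simp⟩
            have hrw2 : s₀.reverse ++ x' :: t'' = (x' :: s₀).reverse ++ t'' := by simp
            have hidx3 : ((s₀.length : Int)) - 2 = (((x' :: s₀).length : Int)) - 3 := by
              simp; omega
            rw [hrw2, hidx3]
            rw [ih (x' :: s₀) t'' (r + 1) (by simp at hn ⊢; omega)
              (stack_inv s₀ x' hs₀ hchk)]
            simp only [bgo]
            rw [if_neg hchk]
        · rw [dif_neg (by rw [hslice]; exact hm)]
          -- no match: both sides take the element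
          have hB : (x :: a :: b :: c :: s₀).take 4 ≠ [1, 3, 2, 1] := by
            intro hc
            apply hm
            simp only [List.take_succ_cons, List.take_zero, List.cons.injEq, and_true] at hc ⊢
            tauto
          have hrw2 : s₀.reverse ++ c :: b :: a :: x :: t'
              = (x :: a :: b :: c :: s₀).reverse ++ t' := by simp
          have hidx2 : ((s₀.reverse.length : Int)) + 1 = (((x :: a :: b :: c :: s₀).length : Int)) - 3 := by
            simp; omega
          rw [hrw2, hidx2]
          rw [ih (x :: a :: b :: c :: s₀) t' r (by simp at hn ⊢; omega)
            (stack_inv (a :: b :: c :: s₀) x hinv hB)]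
          simp only [bgo]
          rw [if_neg hB]

-- ===== VERDICT (by name: the statement is the Claim_ definition above) =====
theorem solution_spec : Claim_equal_solution := by
  unfold Claim_equal_solution
  intro L _
  unfold Spec_solution solution solution_alt
  rw [foldl_eq_bgo]
  have h := main_lemma (3 * L.length) [] L 0 (by simp) (by simp)
  simp only [List.reverse_nil, List.nil_append, List.length_nil, Nat.cast_zero] at h
  have s3 : aloop L (-3) 0 = aloop L (-2) 0 := by
    conv_lhs => rw [aloop]
    rw [dif_pos (by omega), dif_neg (noMatchNeg L (-3) (by norm_num) (by norm_num))]
    norm_num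
  have s2 : aloop L (-2) 0 = aloop L (-1) 0 := by
    conv_lhs => rw [aloop]
    rw [dif_pos (by omega), dif_neg (noMatchNeg L (-2) (by norm_num) (by norm_num))]
    norm_num
  have s1 : aloop L (-1) 0 = aloop L 0 0 := by
    conv_lhs => rw [aloop]
    rw [dif_pos (by omega), dif_neg (noMatchNeg L (-1) (by norm_num) (by norm_num))]
    norm_num
  rw [← s1, ← s2, ← s3]
  rw [show (0 : Int) - 3 = -3 by norm_num] at h
  exact h
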